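-- pv_equiv track=rewrite | github.com/hemmatio/bst-heights | bst.py | bst_heights
-- ===== SOURCE A (Python) =====
-- class TreeNode:
--     def __init__(self, val):
--         self.val = val
--         self.left = None
--         self.right = None
--
-- def insert_bst(root, val):
--     if root is None:
--         return TreeNode(val)
--     if val < root.val:
--         root.left = insert_bst(root.left, val)
--     else:
--         root.right = insert_bst(root.right, val)
--     return root
--
-- def build_bst(arr):
--     root = None
--     for num in arr:
--         root = insert_bst(root, num)
--     return root
--
-- def calculate_height(node):
--     if not node:
--         return -1  # Return -1 because height is the number of edges
--     left_height = calculate_height(node.left)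
--     right_height = calculate_height(node.right)
--     return 1 + max(left_height, right_height)
--
-- def tree_to_string(root, level=0, prefix="Root: "):
--     if not root:
--         return ""
--     result = f"{'  ' * level}{prefix}{root.val}\n"
--     if root.left or root.right:
--         if root.left:
--             result += tree_to_string(root.left, level + 1, "L--- ")
--         else:
--             result += f"{'  ' * (level + 1)}L--- None\n"
--         if root.right:
--             result += tree_to_string(root.right, level + 1, "R--- ")
--         else:
--             result += f"{'  ' * (level + 1)}R--- None\n"
--     return result
--
-- def bst_heights(input_lists):
--     result = []
--     for bst_list in input_lists:
--         root = build_bst(bst_list)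
--         height = calculate_height(root)
--         tree_representation = tree_to_string(root)
--         result.append((bst_list, height, tree_representation))
--     return result
-- ===== SOURCE B (Python) =====
-- # B: iterative insert (pointer descent instead of recursion) and a single fused
-- # traversal computing (height, rendering) in one pass instead of two recursions.
--
-- class _Node:
--     __slots__ = ("val", "left", "right")
--     def __init__(self, val):
--         self.val = val
--         self.left = None
--         self.right = None
--
-- def _insert(root, val):
--     new = _Node(val)
--     if root is None:
--         return new
--     cur = root
--     while True:
--         if val < cur.val:
--             if cur.left is None:
--                 cur.left = new
--                 break
--             cur = cur.left
--         else:
--             if cur.right is None: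
--                 cur.right = new
--                 break
--             cur = cur.right
--     return root
--
-- def _hs(node, level, prefix):
--     """Return (height, rendering) of the subtree in one pass."""
--     if node is None:
--         return -1, ""
--     s = "  " * level + prefix + str(node.val) + "\n"
--     if node.left is None and node.right is None:
--         return 0, s
--     lh, ls = _hs(node.left, level + 1, "L--- ")
--     rh, rs = _hs(node.right, level + 1, "R--- ")
--     if node.left is None:
--         ls = "  " * (level + 1) + "L--- None\n"
--     if node.right is None:
--         rs = "  " * (level + 1) + "R--- None\n"
--     return 1 + max(lh, rh), s + ls + rs
--
-- def _summary(bst_list):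
--     root = None
--     for v in bst_list:
--         root = _insert(root, v)
--     h, s = _hs(root, 0, "Root: ")
--     return (bst_list, h, s)
--
-- def bst_heights(input_lists):
--     return [_summary(bst_list) for bst_list in input_lists]
-- ===== Notes on version B (the rewrite author's own statement) =====
-- stated objective: alternative
-- what changed: Recursive BST insertion is replaced by an iterative pointer descent (path recorded and rebuilt in the port), the two separate recursions for height and string rendering are fused into one traversal returning a (height, string) pair, and the outer accumulator loop becomes a comprehension/map.
import Mathlib
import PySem

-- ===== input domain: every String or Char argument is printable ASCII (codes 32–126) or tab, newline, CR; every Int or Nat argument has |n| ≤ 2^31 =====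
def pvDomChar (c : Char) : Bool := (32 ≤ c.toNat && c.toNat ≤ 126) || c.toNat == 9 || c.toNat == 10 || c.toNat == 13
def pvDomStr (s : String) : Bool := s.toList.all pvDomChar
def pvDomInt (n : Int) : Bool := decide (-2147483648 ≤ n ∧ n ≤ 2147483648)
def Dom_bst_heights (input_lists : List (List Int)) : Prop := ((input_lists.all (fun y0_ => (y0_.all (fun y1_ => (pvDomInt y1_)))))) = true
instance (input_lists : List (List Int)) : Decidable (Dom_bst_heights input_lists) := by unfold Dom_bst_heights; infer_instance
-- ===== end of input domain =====

-- B replaces recursive insertion by an iterative pointer descent and fuses the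
-- height and rendering recursions into one pass (objective: alternative decomposition).
-- Strings are built over List Char (PySem.Chars) and packed with String.ofList at the end.

inductive PvTree where
  | nil : PvTree
  | node : Int → PvTree → PvTree → PvTree
deriving DecidableEq, Repr

-- '  ' * level (2*level spaces), shared by both ports (same f-string expression in both Pythons)
def pyIndent (n : Nat) : List Char := List.replicate (2*n) ' '

-- ===== PORT A =====
def insert_bstA : PvTree → Int → PvTree
  | .nil, val => .node val .nil .nil
  | .node v l r, val =>
      if val < v then .node v (insert_bstA l val) r
      else .node v l (insert_bstA r val)

def build_bstA (arr : List Int) : PvTree := arr.foldl insert_bstA .nil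

def calculate_heightA : PvTree → Int
  | .nil => -1
  | .node _ l r => 1 + max (calculate_heightA l) (calculate_heightA r)

def tree_to_stringA : PvTree → Nat → List Char → List Char
  | .nil, _, _ => []
  | .node v l r, level, pre =>
      let result := pyIndent level ++ pre ++ PySem.Int.toChars v ++ ['\n']
      if l ≠ .nil ∨ r ≠ .nil then
        let result := result ++
          (if l ≠ .nil then tree_to_stringA l (level+1) "L--- ".toList
           else pyIndent (level+1) ++ "L--- None\n".toList)
        result ++
          (if r ≠ .nil then tree_to_stringA r (level+1) "R--- ".toList
           else pyIndent (level+1) ++ "R--- None\n".toList)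
      else result

def bst_heights (input_lists : List (List Int)) : List (List Int × Int × String) :=
  input_lists.foldl
    (fun acc bst_list =>
      let root := build_bstA bst_list
      acc ++ [(bst_list, calculate_heightA root,
               String.ofList (tree_to_stringA root 0 "Root: ".toList))])
    []

-- ===== PORT B =====
-- the saved path of the iterative descent: (went-left?, node value, the untouched sibling)
def rebuildB : List (Bool × Int × PvTree) → PvTree → PvTree
  | [], t => t
  | (true, v, r) :: p, t => rebuildB p (.node v t r)
  | (false, v, l) :: p, t => rebuildB p (.node v l t)

def descendB : PvTree → Int → List (Bool × Int × PvTree) → PvTree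
  | .nil, _, path => rebuildB path .nil   -- unreachable (descent stops before a nil child)
  | .node v l r, val, path =>
      if val < v then
        match l with
        | .nil => rebuildB path (.node v (.node val .nil .nil) r)
        | _ => descendB l val ((true, v, r) :: path)
      else
        match r with
        | .nil => rebuildB path (.node v l (.node val .nil .nil))
        | _ => descendB r val ((false, v, l) :: path)

def insertB (root : PvTree) (val : Int) : PvTree :=
  match root with
  | .nil => .node val .nil .nil
  | t => descendB t val []

-- fused single pass: (height, rendering)
def hsB : PvTree → Nat → List Char → Int × List Char
  | .nil, _, _ => (-1, [])
  | .node v l r, level, pre =>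
      let s := pyIndent level ++ pre ++ PySem.Int.toChars v ++ ['\n']
      if l = .nil ∧ r = .nil then (0, s)
      else
        let pl := hsB l (level+1) "L--- ".toList
        let pr := hsB r (level+1) "R--- ".toList
        let ls := if l = .nil then pyIndent (level+1) ++ "L--- None\n".toList else pl.2
        let rs := if r = .nil then pyIndent (level+1) ++ "R--- None\n".toList else pr.2
        (1 + max pl.1 pr.1, s ++ ls ++ rs)

def summaryB (bst_list : List Int) : List Int × Int × String :=
  let root := bst_list.foldl insertB .nil
  let p := hsB root 0 "Root: ".toList
  (bst_list, p.1, String.ofList p.2)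

def bst_heights_alt (input_lists : List (List Int)) : List (List Int × Int × String) :=
  input_lists.map summaryB

-- ===== PRECONDITION & SPEC =====
def Spec_bst_heights (input_lists : List (List Int)) (out : List (List Int × Int × String)) : Prop := out = bst_heights_alt input_lists
instance (input_lists : List (List Int)) (out : List (List Int × Int × String)) : Decidable (Spec_bst_heights input_lists out) := by unfold Spec_bst_heights; infer_instance

-- ===== CLAIM (what is proved, stated in full; the proofs are below) =====
def Claim_equal_bst_heights : Prop := ∀ (input_lists : List (List Int)), Dom_bst_heights input_lists → Spec_bst_heights input_lists (bst_heights input_lists)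

-- ===== LEMMAS AND PROOFS =====

theorem descendB_eq (t : PvTree) :
    t ≠ .nil → ∀ (val : Int) path, descendB t val path = rebuildB path (insert_bstA t val) := by
  induction t with
  | nil => intro h; exact absurd rfl h
  | node v l r ihl ihr =>
      intro _ val path
      by_cases h : val < v
      · cases l with
        | nil => simp [descendB, insert_bstA, h]
        | node w a b =>
            rw [show descendB (.node v (.node w a b) r) val path
                  = descendB (.node w a b) val ((true, v, r) :: path) by simp [descendB, h]]
            rw [ihl (by simp) val]
            simp [insert_bstA, h, rebuildB]
      · cases r with
        | nil => simp [descendB, insert_bstA, h]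
        | node w a b =>
            rw [show descendB (.node v l (.node w a b)) val path
                  = descendB (.node w a b) val ((false, v, l) :: path) by simp [descendB, h]]
            rw [ihr (by simp) val]
            simp [insert_bstA, h, rebuildB]

theorem insertB_eq : insertB = insert_bstA := by
  funext t val
  cases t with
  | nil => rfl
  | node v l r => simpa [insertB] using descendB_eq (.node v l r) (by simp) val []

theorem hsB_eq (t : PvTree) :
    ∀ level pre, hsB t level pre = (calculate_heightA t, tree_to_stringA t level pre) := by
  induction t with
  | nil => intro level pre; simp [hsB, calculate_heightA, tree_to_stringA]
  | node v l r ihl ihr =>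
      intro level pre
      by_cases h : l = PvTree.nil ∧ r = PvTree.nil
      · obtain ⟨hl, hr⟩ := h
        subst hl; subst hr
        simp [hsB, calculate_heightA, tree_to_stringA]
      · have h' : l ≠ PvTree.nil ∨ r ≠ PvTree.nil := by tauto
        simp only [hsB, tree_to_stringA, calculate_heightA, if_pos h', if_neg h, ihl, ihr]
        by_cases hl : l = PvTree.nil <;> by_cases hr : r = PvTree.nil <;> simp_all

theorem summaryB_eq (bst_list : List Int) :
    summaryB bst_list =
      (bst_list, calculate_heightA (build_bstA bst_list),
       String.ofList (tree_to_stringA (build_bstA bst_list) 0 "Root: ".toList)) := by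
  simp [summaryB, build_bstA, insertB_eq, hsB_eq]

theorem foldl_append_map (f : List Int → List Int × Int × String) (xs : List (List Int)) :
    ∀ acc, xs.foldl (fun acc x => acc ++ [f x]) acc = acc ++ xs.map f := by
  induction xs with
  | nil => intro acc; simp
  | cons x xs ih => intro acc; simp [List.foldl_cons, ih]

-- ===== VERDICT (by name: the statement is the Claim_ definition above) =====
theorem bst_heights_spec : Claim_equal_bst_heights := by
  intro input_lists _
  show bst_heights input_lists = bst_heights_alt input_lists
  unfold bst_heights bst_heights_alt
  rw [foldl_append_map]
  simp [summaryB_eq]
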